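-- pv_equiv track=rewrite | github.com/statisticsnorway/dapla-toolbelt-metadata | klass_subsets/no_changes_all_versions.py | get_lowest_dates
-- ===== SOURCE A (Python) =====
-- def get_lowest_dates(data: list) -> list:
--     """If there is multiple visions of the same code we want to get the one with the lowest valid from date.
--
--     This occurs if a new version of the subset is created and codes have inherited the valid from for just the new version of the subset.
--     """
--     code_map = {}
--     for entry in data:
--         code = entry["code"]
--         if (
--             code not in code_map
--             or entry["validFromInRequestedRange"]
--             < code_map[code]["validFromInRequestedRange"]
--         ):
--             code_map[code] = entry
--     return list(code_map.values())
-- ===== SOURCE B (Python) =====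
-- def get_lowest_dates(data: list) -> list:
--     """Group entries by code, then reduce each group to its first entry with minimal validFrom."""
--     groups = {}
--     for entry in data:
--         groups.setdefault(entry["code"], []).append(entry)
--     result = []
--     for first, *rest in groups.values():
--         best = first
--         for entry in rest:
--             if entry["validFromInRequestedRange"] < best["validFromInRequestedRange"]:
--                 best = entry
--         result.append(best)
--     return result
-- ===== Notes on version B (the rewrite author's own statement) =====
-- stated objective: alternative
-- what changed: Replaces A's single streaming pass with a conditional-overwrite dict of running minima by a group-by-code pass followed by a per-group first-minimal reduction; dict insertion order preserves first-appearance order of codes and the reduction keeps the first entry among ties, exactly as A does.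
import Mathlib
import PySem

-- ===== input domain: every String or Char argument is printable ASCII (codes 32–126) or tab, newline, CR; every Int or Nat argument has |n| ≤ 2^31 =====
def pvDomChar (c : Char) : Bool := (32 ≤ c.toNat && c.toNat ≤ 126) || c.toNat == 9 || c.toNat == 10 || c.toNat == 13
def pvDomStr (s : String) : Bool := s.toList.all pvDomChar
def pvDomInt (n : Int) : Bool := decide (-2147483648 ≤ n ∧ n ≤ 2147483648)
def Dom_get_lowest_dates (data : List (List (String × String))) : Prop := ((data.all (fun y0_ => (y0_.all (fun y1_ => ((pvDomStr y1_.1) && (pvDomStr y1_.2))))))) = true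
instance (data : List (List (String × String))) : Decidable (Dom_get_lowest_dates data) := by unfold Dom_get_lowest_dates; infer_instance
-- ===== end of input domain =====

-- B replaces A's streaming running-minimum dict by a group-by-code pass followed by a
-- per-group first-minimal reduction (alternative decomposition, same cost).


-- entry[k]: Python dict lookup (first match under the association-list convention);
-- total via a default, exact on Pre_ (both keys are present there)
def pvGetS (e : List (String × String)) (k : String) : String := (e.lookup k).getD ""

-- ===== PORT A =====
-- one iteration of A's loop: conditional overwrite of the per-code running minimum
def pvStepA (cm : PySem.Dict String (List (String × String))) (e : List (String × String)) :
    PySem.Dict String (List (String × String)) :=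
  let code := pvGetS e "code"
  if !cm.contains code
      || decide (pvGetS e "validFromInRequestedRange"
                  < pvGetS (cm.getD code []) "validFromInRequestedRange") then
    cm.insert code e
  else cm

def get_lowest_dates (data : List (List (String × String))) : List (List (String × String)) :=
  (data.foldl pvStepA PySem.Dict.empty).values

-- ===== PORT B =====
-- per-group reduction: 'first, *rest' then a running first-minimal scan over rest
-- (the [] case is unreachable: groups built by the loop below are never empty)
def pvBestOf (g : List (List (String × String))) : List (String × String) :=
  match g with
  | [] => []
  | first :: rest =>
      rest.foldl (fun best e =>
        if pvGetS e "validFromInRequestedRange" < pvGetS best "validFromInRequestedRange" then e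
        else best) first

def get_lowest_dates_alt (data : List (List (String × String))) : List (List (String × String)) :=
  ((data.foldl (fun d e => d.modify (pvGetS e "code") [] (· ++ [e]))
      (PySem.Dict.empty : PySem.Dict String (List (List (String × String))))).values).map pvBestOf

-- ===== PRECONDITION & SPEC =====
-- Exactly where the Python A returns (and B too): every entry has a "code" key, and every entry
-- whose code occurs in more than one entry also has "validFromInRequestedRange" (for a code
-- occurring once that key is never read); otherwise both programs raise KeyError.
def Pre_get_lowest_dates (data : List (List (String × String))) : Prop :=
  ∀ e ∈ data, "code" ∈ e.map Prod.fst ∧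
    (data.countP (fun e' => e'.lookup "code" == e.lookup "code") ≤ 1 ∨
      "validFromInRequestedRange" ∈ e.map Prod.fst)
instance (data : List (List (String × String))) : Decidable (Pre_get_lowest_dates data) := by
  unfold Pre_get_lowest_dates; infer_instance

def pvWitness_get_lowest_dates : (List (List (String × String))) :=
  [[("code", "a"), ("validFromInRequestedRange", "2020-01-01")],
   [("code", "a"), ("validFromInRequestedRange", "2019-01-01")],
   [("code", "b"), ("validFromInRequestedRange", "2021-01-01")]]

def Spec_get_lowest_dates (data : List (List (String × String))) (out : List (List (String × String))) : Prop := out = get_lowest_dates_alt data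
instance (data : List (List (String × String))) (out : List (List (String × String))) : Decidable (Spec_get_lowest_dates data out) := by unfold Spec_get_lowest_dates; infer_instance

-- ===== CLAIM (what is proved, stated in full; the proofs are below) =====
def Claim_equal_get_lowest_dates : Prop := ∀ (data : List (List (String × String))), Dom_get_lowest_dates data → Pre_get_lowest_dates data → Spec_get_lowest_dates data (get_lowest_dates data)

-- ===== LEMMAS AND PROOFS =====

-- one step of PySem.List.min?'s fold, specialised to the validFrom key
def pvMinStep (acc : Option (List (String × String))) (e : List (String × String)) :
    Option (List (String × String)) :=
  match acc with
  | none => some e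
  | some m =>
      if pvGetS e "validFromInRequestedRange" < pvGetS m "validFromInRequestedRange" then some e
      else some m

-- the running minimum started at `none` is B's 'first, then scan the rest' reduction
lemma foldl_pvMinStep_none (g : List (List (String × String))) :
    (g.foldl pvMinStep none).getD [] = pvBestOf g := by
  have aux : ∀ (rest : List (List (String × String))) (first : List (String × String)),
      rest.foldl pvMinStep (some first)
        = some (rest.foldl (fun best e =>
            if pvGetS e "validFromInRequestedRange" < pvGetS best "validFromInRequestedRange" then e
            else best) first) := by
    intro rest
    induction rest with
    | nil => intro first; rfl
    | cons e rest ih =>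
      intro first
      simp only [List.foldl_cons]
      rw [show pvMinStep (some first) e
            = some (if pvGetS e "validFromInRequestedRange"
                < pvGetS first "validFromInRequestedRange" then e else first) from by
          show (if pvGetS e "validFromInRequestedRange"
              < pvGetS first "validFromInRequestedRange" then some e else some first) = _
          exact (apply_ite some _ _ _).symm]
      exact ih _
  rcases g with _ | ⟨first, rest⟩
  · rfl
  · show (rest.foldl pvMinStep (some first)).getD [] = _
    rw [aux]
    rfl

-- A's fold, observed at one code c, is the running minimum of the entries with that code
lemma foldA_get? (l : List (List (String × String)))
    (cm : PySem.Dict String (List (String × String))) (c : String) :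
    (l.foldl pvStepA cm).get? c
      = (l.filter (fun e => pvGetS e "code" == c)).foldl pvMinStep (cm.get? c) := by
  induction l generalizing cm with
  | nil => rfl
  | cons e l ih =>
    simp only [List.foldl_cons, List.filter_cons]
    by_cases hc : pvGetS e "code" = c
    · subst hc
      simp only [beq_self_eq_true, if_pos trivial, List.foldl_cons]
      rcases hcm : cm.get? (pvGetS e "code") with _ | m
      · have hcont : cm.contains (pvGetS e "code") = false :=
          (PySem.Dict.get?_eq_none_iff_contains cm _).mp hcm
        have hstep : pvStepA cm e = cm.insert (pvGetS e "code") e := by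
          simp [pvStepA, hcont]
        rw [ih, hstep, PySem.Dict.get?_insert_self]
        rfl
      · have hcont : cm.contains (pvGetS e "code") = true := by
          rw [PySem.Dict.contains_eq_isSome_get?, hcm]; rfl
        have hgd : cm.getD (pvGetS e "code") [] = m :=
          PySem.Dict.getD_of_get?_eq_some cm [] hcm
        by_cases hlt : pvGetS e "validFromInRequestedRange"
            < pvGetS m "validFromInRequestedRange"
        · have hstep : pvStepA cm e = cm.insert (pvGetS e "code") e := by
            simp [pvStepA, hcont, hgd, hlt]
          rw [ih, hstep, PySem.Dict.get?_insert_self]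
          have hm : pvMinStep (some m) e = some e := by unfold pvMinStep; exact if_pos hlt
          rw [hm]
        · have hstep : pvStepA cm e = cm := by
            simp [pvStepA, hcont, hgd, hlt]
          rw [ih, hstep, hcm]
          have hm : pvMinStep (some m) e = some m := by unfold pvMinStep; exact if_neg hlt
          rw [hm]
    · have hb : (pvGetS e "code" == c) = false := beq_eq_false_iff_ne.mpr hc
      rw [if_neg (by simp [hb]), ih]
      congr 1
      simp only [pvStepA]
      split
      · exact PySem.Dict.get?_insert_of_ne _ _ (Ne.symm hc)
      · rfl

-- A's fold visits exactly the codes of the data, in first-appearance order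
lemma foldA_keys (l : List (List (String × String)))
    (cm : PySem.Dict String (List (String × String))) :
    (l.foldl pvStepA cm).keys
      = PySem.Set.update cm.keys (l.map (fun e => pvGetS e "code")) := by
  induction l generalizing cm with
  | nil => rfl
  | cons e l ih =>
    simp only [List.foldl_cons, List.map_cons, PySem.Set.update_cons]
    rw [ih]
    congr 1
    by_cases hcont : cm.contains (pvGetS e "code") = true
    · have hmem : pvGetS e "code" ∈ cm.keys :=
        (PySem.Dict.contains_iff_mem_keys cm _).mp hcont
      rw [PySem.Set.add_of_mem hmem]
      simp only [pvStepA]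
      split
      · exact PySem.Dict.keys_insert_of_contains cm _ hcont
      · rfl
    · have hcf : cm.contains (pvGetS e "code") = false := by simpa using hcont
      have hnmem : pvGetS e "code" ∉ cm.keys := fun h =>
        hcont ((PySem.Dict.contains_iff_mem_keys cm _).mpr h)
      rw [PySem.Set.add_of_not_mem hnmem]
      have hstep : pvStepA cm e = cm.insert (pvGetS e "code") e := by
        simp [pvStepA, hcf]
      rw [hstep]
      exact PySem.Dict.keys_insert_of_not_contains cm _ hcf

-- ===== VERDICT (by name: the statement is the Claim_ definition above) =====
theorem get_lowest_dates_spec : Claim_equal_get_lowest_dates := by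
  intro data _ _
  show get_lowest_dates data = get_lowest_dates_alt data
  unfold get_lowest_dates get_lowest_dates_alt
  -- B's fold in the pair shape of getD_foldl_modify_append
  have hfold :
      data.foldl (fun d e => d.modify (pvGetS e "code") [] (· ++ [e]))
        (PySem.Dict.empty : PySem.Dict String (List (List (String × String))))
        = (data.map (fun e => (pvGetS e "code", e))).foldl
            (fun d p => d.modify p.1 [] (· ++ [p.2])) PySem.Dict.empty := by
    rw [List.foldl_map]
  -- keys of both folds: the distinct codes in first-appearance order
  have hkA : (data.foldl pvStepA PySem.Dict.empty).keys
      = PySem.Set.ofList (data.map (fun e => pvGetS e "code")) := by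
    rw [foldA_keys]
    rw [show (PySem.Dict.empty : PySem.Dict String (List (String × String))).keys = [] from rfl]
    exact PySem.Set.update_nil_left _
  have hkB : ((data.foldl (fun d e => d.modify (pvGetS e "code") [] (· ++ [e]))
        (PySem.Dict.empty : PySem.Dict String (List (List (String × String))))).keys)
      = PySem.Set.ofList (data.map (fun e => pvGetS e "code")) := by
    rw [PySem.Dict.keys_foldl_modify_key data (fun e => pvGetS e "code") []
      (fun _ e => (· ++ [e])) PySem.Dict.empty]
    rw [show (PySem.Dict.empty : PySem.Dict String (List (List (String × String)))).keys = []
      from rfl]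
    exact PySem.Set.update_nil_left _
  have hndA : (data.foldl pvStepA PySem.Dict.empty).keys.Nodup := by
    rw [hkA]; exact PySem.Set.nodup_ofList _
  have hndB : ((data.foldl (fun d e => d.modify (pvGetS e "code") [] (· ++ [e]))
        (PySem.Dict.empty : PySem.Dict String (List (List (String × String))))).keys).Nodup := by
    rw [hkB]; exact PySem.Set.nodup_ofList _
  rw [PySem.Dict.values_eq_map_keys _ hndA ([] : List (String × String)),
      PySem.Dict.values_eq_map_keys _ hndB ([] : List (List (String × String)))]
  rw [hkA, hkB, List.map_map]
  apply List.map_congr_left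
  intro c _
  simp only [Function.comp_apply]
  -- A's value at code c: the running minimum over the entries with code c
  have hA : (data.foldl pvStepA PySem.Dict.empty).getD c []
      = ((data.filter (fun e => pvGetS e "code" == c)).foldl pvMinStep none).getD [] := by
    rw [PySem.Dict.getD_eq_get?_getD, foldA_get?]
    rfl
  -- B's group at code c: exactly the entries with code c, in order
  have hB : ((data.foldl (fun d e => d.modify (pvGetS e "code") [] (· ++ [e]))
        (PySem.Dict.empty : PySem.Dict String (List (List (String × String))))).getD c [])
      = data.filter (fun e => pvGetS e "code" == c) := by
    rw [hfold, PySem.Dict.getD_foldl_modify_append]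
    simp [List.filter_map, Function.comp_def]
  rw [hA, hB, foldl_pvMinStep_none]
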